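-- pv_equiv track=rewrite | github.com/eren23/attocode | src/attocode/code_intel/repo_ranker.py | _categorize_path
-- ===== SOURCE A (Python) =====
-- def _categorize_path(path: str) -> str:
--     """Categorize a file path."""
--     parts = path.lower().split("/")
--     if any(p in ("test", "tests", "spec", "specs") for p in parts):
--         return "test"
--     if any(p in ("util", "utils", "helpers", "lib") for p in parts):
--         return "util"
--     if any(p in ("core", "engine", "kernel") for p in parts):
--         return "core"
--     if any(p in ("api", "routes", "handlers", "views") for p in parts):
--         return "api"
--     if any(p in ("config", "settings", "conf") for p in parts):
--         return "config"
--     return "module"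
-- ===== SOURCE B (Python) =====
-- _KW = {
--     "test": "test", "tests": "test", "spec": "test", "specs": "test",
--     "util": "util", "utils": "util", "helpers": "util", "lib": "util",
--     "core": "core", "engine": "core", "kernel": "core",
--     "api": "api", "routes": "api", "handlers": "api", "views": "api",
--     "config": "config", "settings": "config", "conf": "config",
-- }
-- _PRIORITY = ("test", "util", "core", "api", "config")
--
--
-- def _categorize_path(path: str) -> str:
--     """Categorize a file path."""
--     found = set()
--     for p in path.lower().split("/"):
--         c = _KW.get(p)
--         if c is not None:
--             found.add(c)
--     for c in _PRIORITY:
--         if c in found: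
--             return c
--     return "module"
-- ===== Notes on version B (the rewrite author's own statement) =====
-- stated objective: idiomatic
-- what changed: Replaces five sequential any() scans over the segments with one pass that records, via a keyword-to-category dict, the set of categories present, then resolves by a fixed priority list.
import Mathlib
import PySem

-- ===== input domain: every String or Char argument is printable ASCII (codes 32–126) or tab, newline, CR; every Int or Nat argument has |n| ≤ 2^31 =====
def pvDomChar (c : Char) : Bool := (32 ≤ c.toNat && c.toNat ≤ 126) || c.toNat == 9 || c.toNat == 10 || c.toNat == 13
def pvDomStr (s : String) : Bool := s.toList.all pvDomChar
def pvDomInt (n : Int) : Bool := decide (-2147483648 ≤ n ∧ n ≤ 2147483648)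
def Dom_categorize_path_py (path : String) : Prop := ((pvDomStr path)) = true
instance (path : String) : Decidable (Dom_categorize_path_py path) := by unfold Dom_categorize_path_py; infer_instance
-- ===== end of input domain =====

-- B builds the set of categories present in one pass over the segments (keyword->category dict),
-- then resolves by a fixed priority order; same value as A's five sequential any() scans.
-- B builds the set of categories present in one pass over the segments (keyword->category dict),
-- then resolves them in a fixed priority order; same return value as A's five sequential any() scans.
-- ===== PORT A =====
def categorize_path_py (path : String) : String :=
  let parts := (PySem.Str.split? (PySem.Str.lower path) "/").getD []
  if parts.any (fun p => ["test", "tests", "spec", "specs"].contains p) then "test"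
  else if parts.any (fun p => ["util", "utils", "helpers", "lib"].contains p) then "util"
  else if parts.any (fun p => ["core", "engine", "kernel"].contains p) then "core"
  else if parts.any (fun p => ["api", "routes", "handlers", "views"].contains p) then "api"
  else if parts.any (fun p => ["config", "settings", "conf"].contains p) then "config"
  else "module"

-- ===== PORT B =====
-- _KW: keyword -> category
def pvKw : PySem.Dict String String := PySem.Dict.ofList
  [("test", "test"), ("tests", "test"), ("spec", "test"), ("specs", "test"),
   ("util", "util"), ("utils", "util"), ("helpers", "util"), ("lib", "util"),
   ("core", "core"), ("engine", "core"), ("kernel", "core"),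
   ("api", "api"), ("routes", "api"), ("handlers", "api"), ("views", "api"),
   ("config", "config"), ("settings", "config"), ("conf", "config")]

-- _PRIORITY
def pvPriority : List String := ["test", "util", "core", "api", "config"]

-- B's first loop: found = set(); for p in segments: c = _KW.get(p); if c is not None: found.add(c)
def pvFound (parts : List String) : PySem.Set String :=
  parts.foldl (fun s p =>
    match pvKw.get? p with
    | some c => PySem.Set.add s c
    | none => s) PySem.Set.empty

def categorize_path_py_alt (path : String) : String :=
  let found := pvFound ((PySem.Str.split? (PySem.Str.lower path) "/").getD [])
  (pvPriority.find? (fun c => PySem.Set.contains found c)).getD "module"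

-- ===== PRECONDITION & SPEC =====
def Spec_categorize_path_py (path : String) (out : String) : Prop := out = categorize_path_py_alt path
instance (path : String) (out : String) : Decidable (Spec_categorize_path_py path out) := by unfold Spec_categorize_path_py; infer_instance

-- ===== CLAIM (what is proved, stated in full; the proofs are below) =====
def Claim_equal_categorize_path_py : Prop := ∀ (path : String), Dom_categorize_path_py path → Spec_categorize_path_py path (categorize_path_py path)

-- ===== LEMMAS AND PROOFS =====
lemma pvKw_eq : pvKw = PySem.Dict.mk
  [("test", "test"), ("tests", "test"), ("spec", "test"), ("specs", "test"),
   ("util", "util"), ("utils", "util"), ("helpers", "util"), ("lib", "util"),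
   ("core", "core"), ("engine", "core"), ("kernel", "core"),
   ("api", "api"), ("routes", "api"), ("handlers", "api"), ("views", "api"),
   ("config", "config"), ("settings", "config"), ("conf", "config")] := by decide

set_option maxHeartbeats 2000000 in
lemma kw_test (p : String) :
    (pvKw.get? p == some "test") = ["test", "tests", "spec", "specs"].contains p := by
  by_cases h0 : p = "test"
  . subst h0; decide
  by_cases h1 : p = "tests"
  . subst h1; decide
  by_cases h2 : p = "spec"
  . subst h2; decide
  by_cases h3 : p = "specs"
  . subst h3; decide
  by_cases h4 : p = "util"
  . subst h4; decide
  by_cases h5 : p = "utils"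
  . subst h5; decide
  by_cases h6 : p = "helpers"
  . subst h6; decide
  by_cases h7 : p = "lib"
  . subst h7; decide
  by_cases h8 : p = "core"
  . subst h8; decide
  by_cases h9 : p = "engine"
  . subst h9; decide
  by_cases h10 : p = "kernel"
  . subst h10; decide
  by_cases h11 : p = "api"
  . subst h11; decide
  by_cases h12 : p = "routes"
  . subst h12; decide
  by_cases h13 : p = "handlers"
  . subst h13; decide
  by_cases h14 : p = "views"
  . subst h14; decide
  by_cases h15 : p = "config"
  . subst h15; decide
  by_cases h16 : p = "settings"
  . subst h16; decide
  by_cases h17 : p = "conf"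
  . subst h17; decide
  simp [pvKw_eq, PySem.Dict.get?, beq_iff_eq, h0, h1, h2, h3, Ne.symm h0, Ne.symm h1, Ne.symm h2, Ne.symm h3, Ne.symm h4, Ne.symm h5, Ne.symm h6, Ne.symm h7, Ne.symm h8, Ne.symm h9, Ne.symm h10, Ne.symm h11, Ne.symm h12, Ne.symm h13, Ne.symm h14, Ne.symm h15, Ne.symm h16, Ne.symm h17]

set_option maxHeartbeats 2000000 in
lemma kw_util (p : String) :
    (pvKw.get? p == some "util") = ["util", "utils", "helpers", "lib"].contains p := by
  by_cases h0 : p = "test"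
  . subst h0; decide
  by_cases h1 : p = "tests"
  . subst h1; decide
  by_cases h2 : p = "spec"
  . subst h2; decide
  by_cases h3 : p = "specs"
  . subst h3; decide
  by_cases h4 : p = "util"
  . subst h4; decide
  by_cases h5 : p = "utils"
  . subst h5; decide
  by_cases h6 : p = "helpers"
  . subst h6; decide
  by_cases h7 : p = "lib"
  . subst h7; decide
  by_cases h8 : p = "core"
  . subst h8; decide
  by_cases h9 : p = "engine"
  . subst h9; decide
  by_cases h10 : p = "kernel"
  . subst h10; decide
  by_cases h11 : p = "api"
  . subst h11; decide
  by_cases h12 : p = "routes"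
  . subst h12; decide
  by_cases h13 : p = "handlers"
  . subst h13; decide
  by_cases h14 : p = "views"
  . subst h14; decide
  by_cases h15 : p = "config"
  . subst h15; decide
  by_cases h16 : p = "settings"
  . subst h16; decide
  by_cases h17 : p = "conf"
  . subst h17; decide
  simp [pvKw_eq, PySem.Dict.get?, beq_iff_eq, h4, h5, h6, h7, Ne.symm h0, Ne.symm h1, Ne.symm h2, Ne.symm h3, Ne.symm h4, Ne.symm h5, Ne.symm h6, Ne.symm h7, Ne.symm h8, Ne.symm h9, Ne.symm h10, Ne.symm h11, Ne.symm h12, Ne.symm h13, Ne.symm h14, Ne.symm h15, Ne.symm h16, Ne.symm h17]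

set_option maxHeartbeats 2000000 in
lemma kw_core (p : String) :
    (pvKw.get? p == some "core") = ["core", "engine", "kernel"].contains p := by
  by_cases h0 : p = "test"
  . subst h0; decide
  by_cases h1 : p = "tests"
  . subst h1; decide
  by_cases h2 : p = "spec"
  . subst h2; decide
  by_cases h3 : p = "specs"
  . subst h3; decide
  by_cases h4 : p = "util"
  . subst h4; decide
  by_cases h5 : p = "utils"
  . subst h5; decide
  by_cases h6 : p = "helpers"
  . subst h6; decide
  by_cases h7 : p = "lib"
  . subst h7; decide
  by_cases h8 : p = "core"
  . subst h8; decide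
  by_cases h9 : p = "engine"
  . subst h9; decide
  by_cases h10 : p = "kernel"
  . subst h10; decide
  by_cases h11 : p = "api"
  . subst h11; decide
  by_cases h12 : p = "routes"
  . subst h12; decide
  by_cases h13 : p = "handlers"
  . subst h13; decide
  by_cases h14 : p = "views"
  . subst h14; decide
  by_cases h15 : p = "config"
  . subst h15; decide
  by_cases h16 : p = "settings"
  . subst h16; decide
  by_cases h17 : p = "conf"
  . subst h17; decide
  simp [pvKw_eq, PySem.Dict.get?, beq_iff_eq, h8, h9, h10, Ne.symm h0, Ne.symm h1, Ne.symm h2, Ne.symm h3, Ne.symm h4, Ne.symm h5, Ne.symm h6, Ne.symm h7, Ne.symm h8, Ne.symm h9, Ne.symm h10, Ne.symm h11, Ne.symm h12, Ne.symm h13, Ne.symm h14, Ne.symm h15, Ne.symm h16, Ne.symm h17]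

set_option maxHeartbeats 2000000 in
lemma kw_api (p : String) :
    (pvKw.get? p == some "api") = ["api", "routes", "handlers", "views"].contains p := by
  by_cases h0 : p = "test"
  . subst h0; decide
  by_cases h1 : p = "tests"
  . subst h1; decide
  by_cases h2 : p = "spec"
  . subst h2; decide
  by_cases h3 : p = "specs"
  . subst h3; decide
  by_cases h4 : p = "util"
  . subst h4; decide
  by_cases h5 : p = "utils"
  . subst h5; decide
  by_cases h6 : p = "helpers"
  . subst h6; decide
  by_cases h7 : p = "lib"
  . subst h7; decide
  by_cases h8 : p = "core"
  . subst h8; decide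
  by_cases h9 : p = "engine"
  . subst h9; decide
  by_cases h10 : p = "kernel"
  . subst h10; decide
  by_cases h11 : p = "api"
  . subst h11; decide
  by_cases h12 : p = "routes"
  . subst h12; decide
  by_cases h13 : p = "handlers"
  . subst h13; decide
  by_cases h14 : p = "views"
  . subst h14; decide
  by_cases h15 : p = "config"
  . subst h15; decide
  by_cases h16 : p = "settings"
  . subst h16; decide
  by_cases h17 : p = "conf"
  . subst h17; decide
  simp [pvKw_eq, PySem.Dict.get?, beq_iff_eq, h11, h12, h13, h14, Ne.symm h0, Ne.symm h1, Ne.symm h2, Ne.symm h3, Ne.symm h4, Ne.symm h5, Ne.symm h6, Ne.symm h7, Ne.symm h8, Ne.symm h9, Ne.symm h10, Ne.symm h11, Ne.symm h12, Ne.symm h13, Ne.symm h14, Ne.symm h15, Ne.symm h16, Ne.symm h17]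

set_option maxHeartbeats 2000000 in
lemma kw_config (p : String) :
    (pvKw.get? p == some "config") = ["config", "settings", "conf"].contains p := by
  by_cases h0 : p = "test"
  . subst h0; decide
  by_cases h1 : p = "tests"
  . subst h1; decide
  by_cases h2 : p = "spec"
  . subst h2; decide
  by_cases h3 : p = "specs"
  . subst h3; decide
  by_cases h4 : p = "util"
  . subst h4; decide
  by_cases h5 : p = "utils"
  . subst h5; decide
  by_cases h6 : p = "helpers"
  . subst h6; decide
  by_cases h7 : p = "lib"
  . subst h7; decide
  by_cases h8 : p = "core"
  . subst h8; decide
  by_cases h9 : p = "engine"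
  . subst h9; decide
  by_cases h10 : p = "kernel"
  . subst h10; decide
  by_cases h11 : p = "api"
  . subst h11; decide
  by_cases h12 : p = "routes"
  . subst h12; decide
  by_cases h13 : p = "handlers"
  . subst h13; decide
  by_cases h14 : p = "views"
  . subst h14; decide
  by_cases h15 : p = "config"
  . subst h15; decide
  by_cases h16 : p = "settings"
  . subst h16; decide
  by_cases h17 : p = "conf"
  . subst h17; decide
  simp [pvKw_eq, PySem.Dict.get?, beq_iff_eq, h15, h16, h17, Ne.symm h0, Ne.symm h1, Ne.symm h2, Ne.symm h3, Ne.symm h4, Ne.symm h5, Ne.symm h6, Ne.symm h7, Ne.symm h8, Ne.symm h9, Ne.symm h10, Ne.symm h11, Ne.symm h12, Ne.symm h13, Ne.symm h14, Ne.symm h15, Ne.symm h16, Ne.symm h17]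


lemma mem_foldKw (parts : List String) (s : PySem.Set String) (c : String) :
    c ∈ parts.foldl (fun s p =>
      match pvKw.get? p with
      | some c => PySem.Set.add s c
      | none => s) s ↔ c ∈ s ∨ ∃ p ∈ parts, pvKw.get? p = some c := by
  induction parts generalizing s with
  | nil => simp
  | cons q qs ih =>
    simp only [List.foldl_cons, ih]
    cases h : pvKw.get? q
    · simp [h]
    · simp [h, PySem.Set.mem_add]; tauto

lemma contains_pvFound (parts : List String) (c : String) :
    PySem.Set.contains (pvFound parts) c = parts.any (fun p => pvKw.get? p == some c) := by
  rw [Bool.eq_iff_iff]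
  simp [pvFound, List.any_eq_true, mem_foldKw, PySem.Set.empty]

lemma any_congr_kw (parts : List String) (c : String) (ks : List String)
    (h : ∀ p, (pvKw.get? p == some c) = ks.contains p) :
    parts.any (fun p => pvKw.get? p == some c) = parts.any (fun p => ks.contains p) := by
  simp only [h]

-- ===== VERDICT (by name: the statement is the Claim_ definition above) =====
theorem categorize_path_py_spec : Claim_equal_categorize_path_py := by
  intro path _
  unfold Spec_categorize_path_py categorize_path_py categorize_path_py_alt
  generalize (PySem.Str.split? (PySem.Str.lower path) "/").getD [] = parts
  simp only [pvPriority, List.find?, contains_pvFound,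
    any_congr_kw parts "test" _ kw_test, any_congr_kw parts "util" _ kw_util,
    any_congr_kw parts "core" _ kw_core, any_congr_kw parts "api" _ kw_api,
    any_congr_kw parts "config" _ kw_config]
  cases parts.any (fun p => ["test", "tests", "spec", "specs"].contains p) <;>
  cases parts.any (fun p => ["util", "utils", "helpers", "lib"].contains p) <;>
  cases parts.any (fun p => ["core", "engine", "kernel"].contains p) <;>
  cases parts.any (fun p => ["api", "routes", "handlers", "views"].contains p) <;>
  cases parts.any (fun p => ["config", "settings", "conf"].contains p) <;> rfl
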